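-- pv_equiv track=rewrite | github.com/zigapk/adventofcode | day_7/7-2.py | devide_into_in_and_out
-- ===== SOURCE A (Python) =====
-- def devide_into_in_and_out(a):
--     inside_list = []
--     outside_list = []
--     current = ""
--     for char in a:
--         if char == "[":
--             outside_list.append(current)
--             current = ""
--         elif char == "]":
--             inside_list.append(current)
--             current = ""
--         else:
--             current += char
--     outside_list.append(current)
--
--     return (outside_list, inside_list)
-- ===== SOURCE B (Python) =====
-- def devide_into_in_and_out(a):
--     # jump to the first bracket, slice off the head segment, recurse on the rest;
--     # the result is assembled back-to-front
--     nxt = next((i for i, ch in enumerate(a) if ch in "[]"), -1)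
--     if nxt == -1:
--         return ([a], [])
--     outside_list, inside_list = devide_into_in_and_out(a[nxt + 1:])
--     if a[nxt] == "]":
--         return (outside_list, [a[:nxt]] + inside_list)
--     return ([a[:nxt]] + outside_list, inside_list)
-- ===== Notes on version B (the rewrite author's own statement) =====
-- stated objective: alternative
-- what changed: Replaces A's char-by-char accumulator loop with a recursion that jumps to the first bracket via find, slices off the head segment, recurses on the remainder and classifies each segment by its terminating bracket, assembling the result back-to-front.
import Mathlib
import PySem

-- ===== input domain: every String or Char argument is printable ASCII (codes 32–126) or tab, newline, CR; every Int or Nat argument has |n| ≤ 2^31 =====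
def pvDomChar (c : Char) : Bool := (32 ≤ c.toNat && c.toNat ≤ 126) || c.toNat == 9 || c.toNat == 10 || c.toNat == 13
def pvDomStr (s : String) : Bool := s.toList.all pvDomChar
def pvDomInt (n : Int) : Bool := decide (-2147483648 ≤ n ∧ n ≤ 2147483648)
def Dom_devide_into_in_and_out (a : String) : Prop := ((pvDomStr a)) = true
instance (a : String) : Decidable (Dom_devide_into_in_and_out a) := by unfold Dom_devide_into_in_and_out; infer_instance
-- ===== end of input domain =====

-- B replaces A's char-by-char accumulator loop by a recursion that jumps to the first
-- bracket, slices off the head segment and assembles the result back-to-front (alternative).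

-- ===== PORT A =====
-- the for-loop of A: state (outside_list, inside_list, current); current kept as List Char
def devideLoop (cs : List Char) (outs ins : List (List Char)) (cur : List Char) :
    List (List Char) × List (List Char) :=
  match cs with
  | [] => (outs ++ [cur], ins)
  | c :: rest =>
    if c = '[' then devideLoop rest (outs ++ [cur]) ins []
    else if c = ']' then devideLoop rest outs (ins ++ [cur]) []
    else devideLoop rest outs ins (cur ++ [c])

def devide_into_in_and_out (a : String) : List String × List String :=
  let r := devideLoop a.toList [] [] []
  (r.1.map String.mk, r.2.map String.mk)

-- ===== PORT B =====
-- B's recursion: find the first bracket (`next((i … if ch in "[]"), -1)` = findIdx?),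
-- slice the head off, recurse on the tail, prepend the head to the proper list
def altGo (l : List Char) : List (List Char) × List (List Char) :=
  match h : l.findIdx? (fun c => c = '[' || c = ']') with
  | none => ([l], [])
  | some n =>
    let r := altGo (l.drop (n + 1))
    if l.getD n ' ' = ']' then (r.1, l.take n :: r.2)
    else (l.take n :: r.1, r.2)
termination_by l.length
decreasing_by
  have hn : n < l.length := by
    rcases (List.findIdx?_eq_some_iff_getElem).1 h with ⟨hlt, _⟩
    exact hlt
  simp [List.length_drop]; omega

def devide_into_in_and_out_alt (a : String) : List String × List String :=
  let r := altGo a.toList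
  (r.1.map String.mk, r.2.map String.mk)

-- ===== PRECONDITION & SPEC =====
def Spec_devide_into_in_and_out (a : String) (out : List String × List String) : Prop := out = devide_into_in_and_out_alt a
instance (a : String) (out : List String × List String) : Decidable (Spec_devide_into_in_and_out a out) := by unfold Spec_devide_into_in_and_out; infer_instance

-- ===== CLAIM (what is proved, stated in full; the proofs are below) =====
def Claim_equal_devide_into_in_and_out : Prop := ∀ (a : String), Dom_devide_into_in_and_out a → Spec_devide_into_in_and_out a (devide_into_in_and_out a)

-- ===== LEMMAS AND PROOFS =====

-- A's loop absorbs a bracket-free prefix into `current`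
theorem devideLoop_no_bracket (p : List Char) (hp : ∀ c ∈ p, ¬(c = '[' || c = ']') = true)
    (rest : List Char) (outs ins : List (List Char)) (cur : List Char) :
    devideLoop (p ++ rest) outs ins cur = devideLoop rest outs ins (cur ++ p) := by
  induction p generalizing cur with
  | nil => simp
  | cons c p ih =>
    have hc := hp c (by simp)
    simp only [Bool.or_eq_true, decide_eq_true_eq, not_or] at hc
    simp only [List.cons_append, devideLoop, if_neg hc.1, if_neg hc.2]
    rw [ih (fun d hd => hp d (by simp [hd]))]
    simp

-- main invariant: A's loop (with empty current) computes B's recursion, up to accumulators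
theorem devideLoop_eq_altGo (l : List Char) (outs ins : List (List Char)) :
    devideLoop l outs ins [] = (outs ++ (altGo l).1, ins ++ (altGo l).2) := by
  cases h : l.findIdx? (fun c => c = '[' || c = ']') with
  | none =>
    have hall := List.findIdx?_eq_none_iff.1 h
    have := devideLoop_no_bracket l (by simpa using hall) [] outs ins []
    simp at this
    rw [this]
    simp only [devideLoop]
    rw [altGo, h]
    simp
  | some n =>
    rcases (List.findIdx?_eq_some_iff_getElem).1 h with ⟨hn, hbr, hpre⟩
    have hdec : l = l.take n ++ l[n] :: l.drop (n + 1) := by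
      conv_lhs => rw [← List.take_append_drop n l]
      rw [List.drop_eq_getElem_cons hn]
    have hget : l.getD n ' ' = l[n] := by
      simp [List.getD_eq_getElem?_getD, List.getElem?_eq_getElem hn]
    have htk : ∀ c ∈ l.take n, ¬(c = '[' || c = ']') = true := by
      intro c hc
      rw [List.mem_take_iff_getElem] at hc
      rcases hc with ⟨j, hj, rfl⟩
      exact (by simpa using hpre j (by omega))
    have ih := fun outs ins => devideLoop_eq_altGo (l.drop (n + 1)) outs ins
    conv_lhs => rw [hdec]
    rw [devideLoop_no_bracket _ htk]
    simp only [Bool.or_eq_true, decide_eq_true_eq] at hbr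
    rw [altGo]; rw [h]
    rcases hbr with hb | hb
    · have hne : l[n] ≠ ']' := by rw [hb]; decide
      simp only [devideLoop, hb, List.nil_append, hget, if_neg (hb ▸ hne)]
      rw [ih]
      simp
    · have hne : l[n] ≠ '[' := by rw [hb]; decide
      simp only [devideLoop, if_neg (hb ▸ hne), hb, List.nil_append, hget]
      rw [ih]
      simp
termination_by l.length
decreasing_by
  rcases (List.findIdx?_eq_some_iff_getElem).1 h with ⟨hn, _⟩
  simp [List.length_drop]; omega

-- ===== VERDICT (by name: the statement is the Claim_ definition above) =====
theorem devide_into_in_and_out_spec : Claim_equal_devide_into_in_and_out := by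
  intro a _
  unfold Spec_devide_into_in_and_out devide_into_in_and_out devide_into_in_and_out_alt
  rw [devideLoop_eq_altGo]
  simp
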